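-- pv_equiv track=rewrite | github.com/Yael-Weiss/FinalProject | triangles_funcs.py | is_loc_in_upper_tri
-- ===== SOURCE A (Python) =====
-- from typing import List, Tuple
--
-- Coordinates = Tuple[int, int]
--
-- def is_loc_in_upper_tri(loc: Coordinates) -> bool:
--     # if (loc[0] in range(NUM_ROWS_IN_TRIANGLE) and loc[1] in range(MIDDLE_OF_ROW - loc[0], MIDDLE_OF_ROW + 2*loc[0], 2)):
--     #     return True
--
--     # return False
--     start=12
--     for i in range(1, 5):
--         for j in range(i):
--             if ((i-1) == loc[0] and (start+2*j) == loc[1]):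
--                 return True
--         start -= 1
--     return False
-- ===== SOURCE B (Python) =====
-- def is_loc_in_upper_tri(loc):
--     r, c = loc
--     return 0 <= r <= 3 and 12 - r <= c <= 12 + r and (c + r) % 2 == 0
-- ===== Notes on version B (the rewrite author's own statement) =====
-- stated objective: simpler
-- what changed: Replaced the nested row/column loops with a closed-form bounds-and-parity test (0<=r<=3, 12-r<=c<=12+r, r+c even).
import Mathlib
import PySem

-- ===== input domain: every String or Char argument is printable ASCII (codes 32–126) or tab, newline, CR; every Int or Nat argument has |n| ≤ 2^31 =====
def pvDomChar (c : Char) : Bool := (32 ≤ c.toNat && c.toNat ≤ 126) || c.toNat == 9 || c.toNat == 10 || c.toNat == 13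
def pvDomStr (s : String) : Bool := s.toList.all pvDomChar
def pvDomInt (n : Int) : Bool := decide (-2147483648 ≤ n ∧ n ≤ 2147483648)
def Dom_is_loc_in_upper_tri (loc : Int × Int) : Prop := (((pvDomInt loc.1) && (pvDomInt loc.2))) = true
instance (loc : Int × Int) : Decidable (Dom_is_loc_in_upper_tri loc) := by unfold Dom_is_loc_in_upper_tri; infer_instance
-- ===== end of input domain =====

-- B replaces A's nested loops with a closed-form bounds-and-parity test (simpler).

-- ===== PORT A =====
-- outer 'for i in range(1,5)' with mutable 'start', early return on a hit in the inner loop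
def is_loc_in_upper_tri_loop (loc : Int × Int) : List Int → Int → Bool
  | [], _ => false
  | i :: rest, start =>
    if (PySem.List.pyRange 0 i 1).any
        (fun j => decide ((i - 1) = loc.1) && decide ((start + 2 * j) = loc.2)) then
      true
    else
      is_loc_in_upper_tri_loop loc rest (start - 1)

def is_loc_in_upper_tri (loc : Int × Int) : Bool :=
  is_loc_in_upper_tri_loop loc (PySem.List.pyRange 1 5 1) 12

-- ===== PORT B =====
def is_loc_in_upper_tri_alt (loc : Int × Int) : Bool :=
  decide (0 ≤ loc.1 ∧ loc.1 ≤ 3 ∧ 12 - loc.1 ≤ loc.2 ∧ loc.2 ≤ 12 + loc.1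
          ∧ PySem.Int.mod (loc.2 + loc.1) 2 = 0)

-- ===== PRECONDITION & SPEC =====
def Spec_is_loc_in_upper_tri (loc : Int × Int) (out : Bool) : Prop := out = is_loc_in_upper_tri_alt loc
instance (loc : Int × Int) (out : Bool) : Decidable (Spec_is_loc_in_upper_tri loc out) := by unfold Spec_is_loc_in_upper_tri; infer_instance

-- ===== CLAIM (what is proved, stated in full; the proofs are below) =====
def Claim_equal_is_loc_in_upper_tri : Prop := ∀ (loc : Int × Int), Dom_is_loc_in_upper_tri loc → Spec_is_loc_in_upper_tri loc (is_loc_in_upper_tri loc)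

-- ===== LEMMAS AND PROOFS =====
theorem is_loc_in_upper_tri_eq (loc : Int × Int) :
    is_loc_in_upper_tri loc = is_loc_in_upper_tri_alt loc := by
  rcases loc with ⟨r, c⟩
  rw [Bool.eq_iff_iff]
  simp only [is_loc_in_upper_tri, is_loc_in_upper_tri_alt, is_loc_in_upper_tri_loop,
    show PySem.List.pyRange 1 5 1 = [1, 2, 3, 4] from by decide,
    show PySem.List.pyRange 0 1 1 = [0] from by decide,
    show PySem.List.pyRange 0 2 1 = [0, 1] from by decide,
    show PySem.List.pyRange 0 3 1 = [0, 1, 2] from by decide,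
    show PySem.List.pyRange 0 4 1 = [0, 1, 2, 3] from by decide,
    PySem.Int.mod, List.any_cons, List.any_nil]
  simp only [Bool.if_true_left, Bool.or_eq_true, Bool.and_eq_true, decide_eq_true_eq,
    Bool.false_eq_true, or_false]
  rw [show (c + r).fmod 2 = (c + r) % 2 from by rw [Int.fmod_eq_emod]; simp]
  omega

-- ===== VERDICT (by name: the statement is the Claim_ definition above) =====
theorem is_loc_in_upper_tri_spec : Claim_equal_is_loc_in_upper_tri := by
  intro loc _
  exact is_loc_in_upper_tri_eq loc
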